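-- pv_equiv track=rewrite | github.com/maurinl26/agrumes | app/equarissage.py | _coins_dans_cercle
-- ===== SOURCE A (Python) =====
-- def _coins_dans_cercle(cx: int, cy: int, w: int, h: int,
--                        centre_x: int, centre_y: int, r2: int) -> bool:
--     """Vrai si les 4 coins du rectangle (en cellules) sont dans le cercle."""
--     for ddx, ddy in ((0, 0), (w, 0), (0, h), (w, h)):
--         dx = cx + ddx - centre_x
--         dy = cy + ddy - centre_y
--         if dx * dx + dy * dy > r2:
--             return False
--     return True
-- ===== SOURCE B (Python) =====
-- def _coins_dans_cercle(cx: int, cy: int, w: int, h: int,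
--                        centre_x: int, centre_y: int, r2: int) -> bool:
--     """Closed form: only the farthest corner matters; |dx| and |dy| vary independently."""
--     mdx = max(abs(cx - centre_x), abs(cx + w - centre_x))
--     mdy = max(abs(cy - centre_y), abs(cy + h - centre_y))
--     return mdx * mdx + mdy * mdy <= r2
-- ===== Notes on version B (the rewrite author's own statement) =====
-- stated objective: simpler
-- what changed: Replaces the loop over the four corners with a closed-form test of the single farthest corner, using that |dx| and |dy| are maximised independently.
import Mathlib
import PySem

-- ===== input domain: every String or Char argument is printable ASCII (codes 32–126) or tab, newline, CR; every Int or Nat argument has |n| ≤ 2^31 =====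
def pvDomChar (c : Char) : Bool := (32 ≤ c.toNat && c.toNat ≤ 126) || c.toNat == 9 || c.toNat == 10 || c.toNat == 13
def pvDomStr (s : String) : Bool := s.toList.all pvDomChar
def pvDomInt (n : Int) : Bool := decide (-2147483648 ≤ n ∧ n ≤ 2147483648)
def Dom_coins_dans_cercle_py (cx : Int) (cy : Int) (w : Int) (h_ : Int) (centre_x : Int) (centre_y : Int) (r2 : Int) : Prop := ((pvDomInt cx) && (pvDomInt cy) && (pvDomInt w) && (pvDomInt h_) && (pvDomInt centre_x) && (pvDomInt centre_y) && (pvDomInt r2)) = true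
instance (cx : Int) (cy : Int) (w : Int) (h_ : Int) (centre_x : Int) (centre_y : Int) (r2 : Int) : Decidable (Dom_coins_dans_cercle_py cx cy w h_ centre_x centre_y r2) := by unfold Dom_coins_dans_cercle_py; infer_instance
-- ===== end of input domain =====

-- B replaces A's four-corner loop by a closed-form test of the single farthest corner (objective: simpler).

-- ===== PORT A =====
-- A's 'for ddx, ddy in (…): … return False / return True' loop, as structural recursion on the corner list
def coinsLoopA (cx : Int) (cy : Int) (centre_x : Int) (centre_y : Int) (r2 : Int) : List (Int × Int) → Bool
  | [] => true
  | (ddx, ddy) :: rest =>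
    let dx := cx + ddx - centre_x
    let dy := cy + ddy - centre_y
    if dx * dx + dy * dy > r2 then false
    else coinsLoopA cx cy centre_x centre_y r2 rest

def coins_dans_cercle_py (cx : Int) (cy : Int) (w : Int) (h_ : Int) (centre_x : Int) (centre_y : Int) (r2 : Int) : Bool :=
  coinsLoopA cx cy centre_x centre_y r2 [(0, 0), (w, 0), (0, h_), (w, h_)]

-- ===== PORT B =====
def coins_dans_cercle_py_alt (cx : Int) (cy : Int) (w : Int) (h_ : Int) (centre_x : Int) (centre_y : Int) (r2 : Int) : Bool :=
  let mdx := max |cx - centre_x| |cx + w - centre_x|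
  let mdy := max |cy - centre_y| |cy + h_ - centre_y|
  mdx * mdx + mdy * mdy ≤ r2

-- ===== PRECONDITION & SPEC =====
def Spec_coins_dans_cercle_py (cx : Int) (cy : Int) (w : Int) (h_ : Int) (centre_x : Int) (centre_y : Int) (r2 : Int) (out : Bool) : Prop := out = coins_dans_cercle_py_alt cx cy w h_ centre_x centre_y r2
instance (cx : Int) (cy : Int) (w : Int) (h_ : Int) (centre_x : Int) (centre_y : Int) (r2 : Int) (out : Bool) : Decidable (Spec_coins_dans_cercle_py cx cy w h_ centre_x centre_y r2 out) := by unfold Spec_coins_dans_cercle_py; infer_instance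

-- ===== CLAIM (what is proved, stated in full; the proofs are below) =====
def Claim_equal_coins_dans_cercle_py : Prop := ∀ (cx : Int) (cy : Int) (w : Int) (h_ : Int) (centre_x : Int) (centre_y : Int) (r2 : Int), Dom_coins_dans_cercle_py cx cy w h_ centre_x centre_y r2 → Spec_coins_dans_cercle_py cx cy w h_ centre_x centre_y r2 (coins_dans_cercle_py cx cy w h_ centre_x centre_y r2)

-- ===== LEMMAS AND PROOFS =====
-- (max |a| |b|)² = max a² b²
theorem maxabs_sq (a b : Int) : (max |a| |b|) * (max |a| |b|) = max (a * a) (b * b) := by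
  rcases le_total |a| |b| with h | h
  · rw [max_eq_right h, max_eq_right (by nlinarith [abs_nonneg a, abs_nonneg b, abs_mul_abs_self a, abs_mul_abs_self b]), abs_mul_abs_self]
  · rw [max_eq_left h, max_eq_left (by nlinarith [abs_nonneg a, abs_nonneg b, abs_mul_abs_self a, abs_mul_abs_self b]), abs_mul_abs_self]

-- ===== VERDICT (by name: the statement is the Claim_ definition above) =====
theorem coins_dans_cercle_py_spec : Claim_equal_coins_dans_cercle_py := by
  intro cx cy w h_ centre_x centre_y r2 _
  unfold Spec_coins_dans_cercle_py
  simp only [coins_dans_cercle_py, coinsLoopA, coins_dans_cercle_py_alt, add_zero, maxabs_sq, gt_iff_lt]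
  split_ifs with h1 h2 h3 h4 <;>
    symm <;>
    simp only [decide_eq_false_iff_not, decide_eq_true_eq, not_le] <;>
    rcases max_cases ((cx - centre_x) * (cx - centre_x)) ((cx + w - centre_x) * (cx + w - centre_x)) with ⟨hx, hx'⟩ | ⟨hx, hx'⟩ <;>
    rcases max_cases ((cy - centre_y) * (cy - centre_y)) ((cy + h_ - centre_y) * (cy + h_ - centre_y)) with ⟨hy, hy'⟩ | ⟨hy, hy'⟩ <;>
    rw [hx, hy] <;> omega
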